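-- pv_equiv track=rewrite | github.com/maiconsalomon-hash/mps-robo-imoveis | site_health_history.py | _recovering
-- ===== SOURCE A (Python) =====
-- from typing import Any
--
-- def _is_ok(st: str) -> bool:
--     return st == "OK"
--
-- def _recovering(series_chr: list[dict[str, Any]]) -> bool:
--     n = len(series_chr)
--     if n < 4:
--         return False
--     older = series_chr[: n // 2]
--     newer = series_chr[n // 2 :]
--     bad_o = sum(1 for r in older if not _is_ok(r["extraction_status"]))
--     bad_n = sum(1 for r in newer if not _is_ok(r["extraction_status"]))
--     tail_ok = all(_is_ok(r["extraction_status"]) for r in series_chr[-3:])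
--     return bad_o >= max(2, len(older) // 2) and bad_n == 0 and tail_ok and len(newer) >= 2
-- ===== SOURCE B (Python) =====
-- def _is_ok(st: str) -> bool:
--     return st == "OK"
--
-- def _recovering(series_chr: list) -> bool:
--     n = len(series_chr)
--     if n < 4:
--         return False
--     oks = [_is_ok(r["extraction_status"]) for r in series_chr]
--     run = 0
--     for ok in reversed(oks):
--         if not ok:
--             break
--         run += 1
--     # "newer half all OK" together with "last 3 OK" is exactly a trailing OK-run
--     # covering max(n - n//2, 3) records; then every bad record lies in the older
--     # half, so the older-half bad count equals the total bad count n - sum(oks).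
--     return run >= max(n - n // 2, 3) and n - sum(oks) >= max(2, (n // 2) // 2)
-- ===== Notes on version B (the rewrite author's own statement) =====
-- stated objective: alternative
-- what changed: B replaces A's half/tail slicing and per-half counting by a trailing-OK-run characterization: the newer-half-clean and last-3-OK conditions become a single check that the trailing run of OK records has length >= max(n - n//2, 3), and the older-half bad count becomes the total bad count n - sum(oks), which coincides once the suffix is clean.
import Mathlib
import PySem

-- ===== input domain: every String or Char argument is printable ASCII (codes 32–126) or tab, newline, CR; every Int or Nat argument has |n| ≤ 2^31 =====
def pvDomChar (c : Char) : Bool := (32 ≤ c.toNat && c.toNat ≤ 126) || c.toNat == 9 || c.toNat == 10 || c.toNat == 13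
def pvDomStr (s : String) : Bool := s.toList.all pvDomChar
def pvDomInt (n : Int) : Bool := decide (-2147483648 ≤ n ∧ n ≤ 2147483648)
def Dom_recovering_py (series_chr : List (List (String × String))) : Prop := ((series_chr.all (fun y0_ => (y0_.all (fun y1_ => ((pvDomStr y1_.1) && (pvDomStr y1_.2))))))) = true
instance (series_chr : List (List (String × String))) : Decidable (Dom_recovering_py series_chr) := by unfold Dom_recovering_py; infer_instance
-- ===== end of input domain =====

-- B re-expresses A's newer-half-clean and last-3-OK checks as one trailing OK-run length test
-- and uses the total bad count instead of the older-half bad count; objective: alternative.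

-- ===== PORT A =====
-- _is_ok
def is_ok_py (st : String) : Bool := st == "OK"
-- r["extraction_status"]; the KeyError case (key absent) is excluded by Pre_ below
def status_py (r : List (String × String)) : String :=
  (PySem.Dict.mk r).getD "extraction_status" ""

def recovering_py (series_chr : List (List (String × String))) : Bool :=
  let n : Int := series_chr.length
  if n < 4 then false
  else
    let older := PySem.List.slice series_chr none (some (PySem.Int.floordiv n 2))
    let newer := PySem.List.slice series_chr (some (PySem.Int.floordiv n 2)) none
    let bad_o : Int := ((older.filter (fun r => !(is_ok_py (status_py r)))).length : Int)
    let bad_n : Int := ((newer.filter (fun r => !(is_ok_py (status_py r)))).length : Int)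
    let tail_ok := (PySem.List.slice series_chr (some (-3)) none).all (fun r => is_ok_py (status_py r))
    decide (bad_o ≥ max 2 (PySem.Int.floordiv (older.length : Int) 2)) &&
      (bad_n == 0) && tail_ok && decide ((newer.length : Int) ≥ 2)

-- ===== PORT B =====
def is_ok_alt (st : String) : Bool := st == "OK"
def status_alt (r : List (String × String)) : String :=
  (PySem.Dict.mk r).getD "extraction_status" ""
-- Source B's 'for ok in reversed(oks): break on first not-ok': leading-True count of the reversed list
def leadTrue : List Bool → Nat
  | [] => 0
  | b :: bs => if b then leadTrue bs + 1 else 0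

def recovering_py_alt (series_chr : List (List (String × String))) : Bool :=
  let n : Int := series_chr.length
  if n < 4 then false
  else
    let oks := series_chr.map (fun r => is_ok_alt (status_alt r))
    let run : Int := (leadTrue oks.reverse : Int)
    decide (run ≥ max (n - PySem.Int.floordiv n 2) 3) &&
      decide (n - (oks.countP id : Int) ≥ max 2 (PySem.Int.floordiv (PySem.Int.floordiv n 2) 2))

-- ===== PRECONDITION & SPEC =====
-- Pre_ excludes inputs of length ≥ 4 whose records lack the "extraction_status" key, on which A raises KeyError.
def Pre_recovering_py (series_chr : List (List (String × String))) : Prop :=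
  series_chr.length < 4 ∨
    ∀ r ∈ series_chr, ((PySem.Dict.mk r).contains "extraction_status") = true
instance (series_chr : List (List (String × String))) : Decidable (Pre_recovering_py series_chr) := by
  unfold Pre_recovering_py; infer_instance

def pvWitness_recovering_py : (List (List (String × String))) :=
  [[("extraction_status", "ERR")], [("extraction_status", "ERR")],
   [("extraction_status", "OK")], [("extraction_status", "OK")]]

def Spec_recovering_py (series_chr : List (List (String × String))) (out : Bool) : Prop := out = recovering_py_alt series_chr
instance (series_chr : List (List (String × String))) (out : Bool) : Decidable (Spec_recovering_py series_chr out) := by unfold Spec_recovering_py; infer_instance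

-- ===== CLAIM =====
def Claim_equal_recovering_py : Prop := ∀ (series_chr : List (List (String × String))), Dom_recovering_py series_chr → Pre_recovering_py series_chr → Spec_recovering_py series_chr (recovering_py series_chr)

-- ===== LEMMAS AND PROOFS =====

theorem leadTrue_ge (m : List Bool) : ∀ (k : Nat), k ≤ m.length →
    (k ≤ leadTrue m ↔ (m.take k).all id = true) := by
  induction m with
  | nil =>
    intro k hk
    have : k = 0 := Nat.le_zero.mp (by simpa using hk)
    subst this; simp
  | cons b bs ih =>
    intro k hk
    cases k with
    | zero => simp
    | succ k' =>
      cases b with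
      | false => simp [leadTrue]
      | true =>
        simp only [leadTrue, if_true, List.take_succ_cons, List.all_cons, id, Bool.true_and]
        rw [show (k' + 1 ≤ leadTrue bs + 1) ↔ k' ≤ leadTrue bs from by omega,
          ih k' (by simpa using hk)]

-- trailing-run characterization: k ≤ run ↔ the last k elements are all true
theorem run_ge (l : List Bool) (k : Nat) (hk : k ≤ l.length) :
    (k ≤ leadTrue l.reverse ↔ (l.drop (l.length - k)).all id = true) := by
  rw [leadTrue_ge l.reverse k (by simpa using hk), List.take_reverse, List.all_reverse]

theorem all_drop_mono (l : List Bool) {a b : Nat} (hab : a ≤ b)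
    (h : (l.drop a).all id = true) : (l.drop b).all id = true := by
  have hd : l.drop b = (l.drop a).drop (b - a) := by rw [List.drop_drop]; congr 1; omega
  rw [hd, List.all_eq_true] at *
  intro x hx
  exact h x (List.mem_of_mem_drop hx)

theorem filter_not_len_zero (l : List Bool) :
    (l.filter (fun b => !b)).length = 0 ↔ l.all id = true := by
  simp [List.length_eq_zero_iff, List.filter_eq_nil_iff]

-- once the dropped part is all-true, the bad count of the prefix is the total bad count
theorem filter_take_eq (l : List Bool) (k : Nat) (h : (l.drop k).all id = true) :
    ((l.take k).filter (fun b => !b)).length = (l.filter (fun b => !b)).length := by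
  conv_rhs => rw [← List.take_append_drop k l]
  rw [List.filter_append, List.length_append, ((filter_not_len_zero (l.drop k)).mpr h)]
  omega

theorem total_bad (l : List Bool) :
    (l.filter (fun b => !b)).length = l.length - l.countP id := by
  have h := List.length_eq_countP_add_countP (l := l) id
  have h2 : List.countP (fun b => !b) l = (l.filter (fun b => !b)).length :=
    List.countP_eq_length_filter
  have he : List.countP (fun a => decide ¬id a = true) l = List.countP (fun b => !b) l := by
    apply List.countP_congr; intro b _; cases b <;> simp
  omega

-- the two ports' helpers are definitionally the same
theorem status_eq : status_py = status_alt := rfl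
theorem is_ok_eq : is_ok_py = is_ok_alt := rfl

-- ===== VERDICT =====
theorem recovering_py_spec : Claim_equal_recovering_py := by
  intro s _ _
  unfold Spec_recovering_py recovering_py recovering_py_alt
  by_cases h4 : (s.length : Int) < 4
  · simp [h4]
  · simp only [h4, if_false]
    have hlen : 4 ≤ s.length := by omega
    have hfd : PySem.Int.floordiv (s.length : Int) 2 = ((s.length / 2 : Nat) : Int) :=
      PySem.Int.floordiv_natCast s.length 2
    have hfd2 : PySem.Int.floordiv ((s.length / 2 : Nat) : Int) 2 = ((s.length / 2 / 2 : Nat) : Int) :=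
      PySem.Int.floordiv_natCast (s.length / 2) 2
    rw [hfd, hfd2]
    have e1 : PySem.List.slice s none (some ((s.length / 2 : Nat) : Int)) = s.take (s.length / 2) :=
      PySem.List.slice_to_natCast s (s.length / 2)
    have e2 : PySem.List.slice s (some ((s.length / 2 : Nat) : Int)) none = s.drop (s.length / 2) :=
      PySem.List.slice_from_natCast s (s.length / 2)
    have e3 : PySem.List.slice s (some (-3)) none = s.drop (s.length - 3) :=
      PySem.List.slice_from_neg_ofNat s 3 (by omega)
    rw [e1, e2, e3, status_eq, is_ok_eq]
    -- older.length = s.length/2, then the second floordiv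
    have hol : (s.take (s.length / 2)).length = s.length / 2 := by
      simp [List.length_take]; omega
    have hfd3 : PySem.Int.floordiv (((s.take (s.length / 2)).length : Nat) : Int) 2
        = ((s.length / 2 / 2 : Nat) : Int) := by rw [hol, hfd2]
    rw [hfd3]
    -- transfer the record-level counts/scan to the boolean list l
    have hbadO : ((s.take (s.length / 2)).filter (fun r => !(is_ok_alt (status_alt r)))).length
        = (((s.map (fun r => is_ok_alt (status_alt r))).take (s.length / 2)).filter
            (fun b => !b)).length := by
      rw [← List.map_take, List.filter_map]; simp [Function.comp_def]
    have hbadN : ((s.drop (s.length / 2)).filter (fun r => !(is_ok_alt (status_alt r)))).length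
        = (((s.map (fun r => is_ok_alt (status_alt r))).drop (s.length / 2)).filter
            (fun b => !b)).length := by
      rw [← List.map_drop, List.filter_map]; simp [Function.comp_def]
    have htail : ((s.drop (s.length - 3)).all (fun r => is_ok_alt (status_alt r)))
        = (((s.map (fun r => is_ok_alt (status_alt r))).drop (s.length - 3)).all id) := by
      rw [← List.map_drop, List.all_map]; rfl
    rw [hbadO, hbadN, htail]
    set l : List Bool := s.map (fun r => is_ok_alt (status_alt r)) with hl
    have hll : l.length = s.length := by simp [hl]
    set nn := s.length with hnn
    set half := nn / 2 with hhalf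
    have hhle : half ≤ nn := Nat.div_le_self _ _
    rw [Bool.eq_iff_iff]
    simp only [Bool.and_eq_true, decide_eq_true_eq, beq_iff_eq, List.length_drop]
    -- the trailing-run characterization
    have hneed : ((max (nn - half) 3 : Nat) : Int) = (max ((nn : Int) - ((half : Nat) : Int)) 3) := by
      simp [Nat.cast_max, Nat.cast_sub hhle]
    rw [← hneed]
    have hkle : max (nn - half) 3 ≤ l.length := by rw [hll]; omega
    have hrun := run_ge l (max (nn - half) 3) hkle
    rw [hll] at hrun
    have hmin : nn - max (nn - half) 3 = min half (nn - 3) := by omega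
    rw [hmin] at hrun
    have hsplit : (l.drop (min half (nn - 3))).all id = true ↔
        ((l.drop half).all id = true ∧ (l.drop (nn - 3)).all id = true) := by
      constructor
      · intro h
        exact ⟨all_drop_mono l (Nat.min_le_left _ _) h, all_drop_mono l (Nat.min_le_right _ _) h⟩
      · intro h
        rcases Nat.le_total half (nn - 3) with hc | hc
        · rw [Nat.min_eq_left hc]; exact h.1
        · rw [Nat.min_eq_right hc]; exact h.2
    constructor
    · intro hLHS
      obtain ⟨⟨⟨hOthr, hN0⟩, htl⟩, -⟩ := hLHS
      have hNall : (l.drop half).all id = true :=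
        (filter_not_len_zero _).mp (by exact_mod_cast hN0)
      have hrge : ((max (nn - half) 3 : Nat) : Int) ≤ ((leadTrue l.reverse : Nat) : Int) := by
        exact_mod_cast (hrun.mpr (hsplit.mpr ⟨hNall, htl⟩))
      refine ⟨hrge, ?_⟩
      have hO := filter_take_eq l half hNall
      have htot := total_bad l
      have hcnt : l.countP id ≤ l.length := List.countP_le_length
      rw [hll] at htot hcnt
      omega
    · rintro ⟨hrge, hbad⟩
      have hrn : max (nn - half) 3 ≤ leadTrue l.reverse := by exact_mod_cast hrge
      have hall := hsplit.mp (hrun.mp hrn)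
      have hN0 : (((l.drop half).filter (fun b => !b)).length : Int) = 0 := by
        exact_mod_cast (filter_not_len_zero _).mpr hall.1
      refine ⟨⟨⟨?_, hN0⟩, hall.2⟩, by omega⟩
      have hO := filter_take_eq l half hall.1
      have htot := total_bad l
      have hcnt : l.countP id ≤ l.length := List.countP_le_length
      rw [hll] at htot hcnt
      omega
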